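-- pv_equiv track=rewrite | github.com/gsy0911/tipo | tipo/utils.py | insert_large_str
-- ===== SOURCE A (Python) =====
-- def insert_str(base: str, addition: str, insert_pos: int):
--     addition_len = len(addition)
--     return f"{base[:insert_pos]}{addition}{base[addition_len+insert_pos:]}"
--
-- def insert_large_str(base: str, addition: str, insert_x: int, insert_y: int):
--     base_list = base.split("\n")
--     addition_list = addition.split("\n")
--     addition_height = len(addition_list)
--     addition_index = 0
--     result_list = []
--     for idx, b in enumerate(base_list):
--         if insert_y <= idx < insert_y + addition_height:
--             result = insert_str(b, addition_list[addition_index], insert_x)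
--             result_list.append(result)
--             addition_index += 1
--         else:
--             result_list.append(b)
--     return "\n".join(result_list)
-- ===== SOURCE B (Python) =====
-- def insert_str(base: str, addition: str, insert_pos: int):
--     return base[:insert_pos] + addition + base[len(addition) + insert_pos:]
--
-- def insert_large_str(base: str, addition: str, insert_x: int, insert_y: int):
--     lines = base.split("\n")
--     block = addition.split("\n")
--     start = max(0, insert_y)
--     stop = max(0, insert_y + len(block))
--     lines[start:stop] = [insert_str(line, add, insert_x)
--                          for line, add in zip(lines[start:stop], block)]
--     return "\n".join(lines)
-- ===== Notes on version B (the rewrite author's own statement) =====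
-- stated objective: simpler
-- what changed: Instead of scanning every base line with an interval test and a running addition_index, B computes the clamped window [max(0,insert_y), max(0,insert_y+len(block))) once and slice-assigns it to the zip of the window lines with the addition lines, so the per-line branch and the counter disappear.
import Mathlib
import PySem

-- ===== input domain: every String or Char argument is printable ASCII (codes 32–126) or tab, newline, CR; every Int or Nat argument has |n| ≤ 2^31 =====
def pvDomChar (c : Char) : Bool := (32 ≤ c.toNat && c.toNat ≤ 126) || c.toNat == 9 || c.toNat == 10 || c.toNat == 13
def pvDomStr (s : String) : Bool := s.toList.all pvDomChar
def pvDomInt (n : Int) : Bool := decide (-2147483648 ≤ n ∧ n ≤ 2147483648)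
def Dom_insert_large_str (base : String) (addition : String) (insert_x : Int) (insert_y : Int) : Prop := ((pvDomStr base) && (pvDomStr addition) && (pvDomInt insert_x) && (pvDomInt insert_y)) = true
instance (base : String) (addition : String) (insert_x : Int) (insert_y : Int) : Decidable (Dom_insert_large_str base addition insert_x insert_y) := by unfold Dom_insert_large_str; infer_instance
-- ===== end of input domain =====

-- B replaces A's full scan with its interval branch and running addition_index by a
-- single clamped slice-assignment window zipped with the addition lines (objective: simpler).

-- shared module helper insert_str (both Pythons define it verbatim):
-- f"{base[:insert_pos]}{addition}{base[len(addition)+insert_pos:]}"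
def pvInsertStr (b : String) (addition : String) (insert_pos : Int) : String :=
  PySem.Str.join "" [PySem.Str.slice b none (some insert_pos), addition,
                     PySem.Str.slice b (some (PySem.Str.len addition + insert_pos)) none]

-- s.split("\n"): the separator is non-empty, so split? is always `some`
def pySplitNL (s : String) : List String := (PySem.Str.split? s "\n").getD []

-- ===== PORT A =====
def insert_large_str (base : String) (addition : String) (insert_x : Int) (insert_y : Int) : String :=
  let base_list := pySplitNL base
  let addition_list := pySplitNL addition
  let addition_height : Int := addition_list.length
  -- for idx, b in enumerate(base_list) with state (addition_index, result_list);
  -- addition_list[addition_index] is always in range, ported with pyGetD (default never used)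
  let st := (PySem.List.enumerate base_list).foldl
    (fun (st : Int × List String) (p : Int × String) =>
      if insert_y ≤ p.1 ∧ p.1 < insert_y + addition_height then
        (st.1 + 1, st.2 ++ [pvInsertStr p.2 (PySem.List.pyGetD addition_list st.1 "") insert_x])
      else (st.1, st.2 ++ [p.2]))
    ((0 : Int), ([] : List String))
  PySem.Str.join "\n" st.2

-- ===== PORT B =====
def insert_large_str_alt (base : String) (addition : String) (insert_x : Int) (insert_y : Int) : String :=
  let lines := pySplitNL base
  let block := pySplitNL addition
  let start : Int := max 0 insert_y
  let stop : Int := max 0 (insert_y + (block.length : Int))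
  -- lines[start:stop] = [insert_str(line, add, insert_x) for line, add in zip(lines[start:stop], block)]
  let repl := ((PySem.List.slice lines (some start) (some stop)).zip block).map
    (fun p => pvInsertStr p.1 p.2 insert_x)
  PySem.Str.join "\n"
    (PySem.List.slice lines none (some start) ++ repl ++ PySem.List.slice lines (some stop) none)

-- ===== PRECONDITION & SPEC =====
def Spec_insert_large_str (base : String) (addition : String) (insert_x : Int) (insert_y : Int) (out : String) : Prop := out = insert_large_str_alt base addition insert_x insert_y
instance (base : String) (addition : String) (insert_x : Int) (insert_y : Int) (out : String) : Decidable (Spec_insert_large_str base addition insert_x insert_y out) := by unfold Spec_insert_large_str; infer_instance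

-- ===== CLAIM (what is proved, stated in full; the proofs are below) =====
def Claim_equal_insert_large_str : Prop := ∀ (base : String) (addition : String) (insert_x : Int) (insert_y : Int), Dom_insert_large_str base addition insert_x insert_y → Spec_insert_large_str base addition insert_x insert_y (insert_large_str base addition insert_x insert_y)

-- ===== LEMMAS AND PROOFS =====

-- proof-side reference: element i of the result is patched iff s ≤ i < t
def pvSpecA (bl : List String) (x : Int) (s t : Nat) : List String → Nat → List String
  | [], _ => []
  | b :: rest, k =>
      (if s ≤ k ∧ k < t then pvInsertStr b (bl.getD (k - s) "") x else b) :: pvSpecA bl x s t rest (k + 1)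

lemma pvSpecA_length (bl : List String) (x : Int) (s t : Nat) :
    ∀ (ls : List String) (k : Nat), (pvSpecA bl x s t ls k).length = ls.length := by
  intro ls
  induction ls with
  | nil => intro k; simp [pvSpecA]
  | cons b rest ih => intro k; simp [pvSpecA, ih]

lemma pvSpecA_getElem (bl : List String) (x : Int) (s t : Nat) :
    ∀ (ls : List String) (k i : Nat) (h : i < (pvSpecA bl x s t ls k).length),
      (pvSpecA bl x s t ls k)[i] =
        if s ≤ k + i ∧ k + i < t then
          pvInsertStr (ls[i]'(by simpa [pvSpecA_length] using h)) (bl.getD (k + i - s) "") x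
        else ls[i]'(by simpa [pvSpecA_length] using h) := by
  intro ls
  induction ls with
  | nil => intro k i h; simp [pvSpecA] at h
  | cons b rest ih =>
    intro k i h
    cases i with
    | zero => simp [pvSpecA]
    | succ j =>
      have h' : j < (pvSpecA bl x s t rest (k + 1)).length := by
        simp [pvSpecA_length] at h ⊢; omega
      have := ih (k + 1) j h'
      simp only [pvSpecA, List.getElem_cons_succ]
      rw [this]
      have e1 : k + 1 + j = k + (j + 1) := by omega
      simp [e1]

-- A's loop computes pvSpecA: induction over the enumerate fold, carrying the
-- invariant addition_index = min k t - min k s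
lemma pvLoopA (bl : List String) (x y : Int) :
    ∀ (ls : List String) (k : Nat) (acc : List String),
      ((PySem.List.enumerate ls (k : Int)).foldl
        (fun (st : Int × List String) (p : Int × String) =>
          if y ≤ p.1 ∧ p.1 < y + (bl.length : Int) then
            (st.1 + 1, st.2 ++ [pvInsertStr p.2 (PySem.List.pyGetD bl st.1 "") x])
          else (st.1, st.2 ++ [p.2]))
        (((min k ((y + (bl.length : Int)).toNat) - min k y.toNat : Nat) : Int), acc)).2
      = acc ++ pvSpecA bl x y.toNat ((y + (bl.length : Int)).toNat) ls k := by
  intro ls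
  induction ls with
  | nil => intro k acc; simp [pvSpecA, PySem.List.enumerate_nil]
  | cons b rest ih =>
    intro k acc
    rw [PySem.List.enumerate_cons, List.foldl_cons]
    have hk1 : ((k : Int) + 1) = ((k + 1 : Nat) : Int) := by push_cast; ring
    by_cases hc : y ≤ (k : Int) ∧ (k : Int) < y + (bl.length : Int)
    · have hs : y.toNat ≤ k ∧ k < (y + (bl.length : Int)).toNat := by omega
      have hjs : ((min k ((y + (bl.length : Int)).toNat) - min k y.toNat : Nat) : Int)
          = ((k - y.toNat : Nat) : Int) := by omega
      have hj1 : ((min k ((y + (bl.length : Int)).toNat) - min k y.toNat : Nat) : Int) + 1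
          = ((min (k + 1) ((y + (bl.length : Int)).toNat) - min (k + 1) y.toNat : Nat) : Int) := by
        omega
      rw [if_pos hc]
      have h2 : PySem.List.pyGetD bl
          (((min k ((y + (bl.length : Int)).toNat) - min k y.toNat : Nat) : Int)) ""
          = bl.getD (k - y.toNat) "" := by
        rw [hjs, PySem.List.pyGetD_natCast]
      rw [h2, hj1]
      rw [hk1, ih]
      have : pvSpecA bl x y.toNat ((y + (bl.length : Int)).toNat) (b :: rest) k
          = pvInsertStr b (bl.getD (k - y.toNat) "") x
            :: pvSpecA bl x y.toNat ((y + (bl.length : Int)).toNat) rest (k + 1) := by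
        simp only [pvSpecA]; rw [if_pos hs]
      rw [this]; simp
    · have hs : ¬ (y.toNat ≤ k ∧ k < (y + (bl.length : Int)).toNat) := by omega
      have hj : ((min k ((y + (bl.length : Int)).toNat) - min k y.toNat : Nat) : Int)
          = ((min (k + 1) ((y + (bl.length : Int)).toNat) - min (k + 1) y.toNat : Nat) : Int) := by
        omega
      rw [if_neg hc, hj]
      rw [hk1, ih]
      have : pvSpecA bl x y.toNat ((y + (bl.length : Int)).toNat) (b :: rest) k
          = b :: pvSpecA bl x y.toNat ((y + (bl.length : Int)).toNat) rest (k + 1) := by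
        simp only [pvSpecA]; rw [if_neg hs]
      rw [this]; simp

-- pvSpecA is B's slice-assignment decomposition
lemma pvSpecA_decomp (bl : List String) (x : Int) (s t : Nat)
    (hst : s ≤ t) (hts : t - s ≤ bl.length) (ls : List String) :
    pvSpecA bl x s t ls 0 =
      ls.take s ++ (((ls.drop s).take (t - s)).zip bl).map (fun p => pvInsertStr p.1 p.2 x)
        ++ ls.drop t := by
  have hlen : (pvSpecA bl x s t ls 0).length =
      (ls.take s ++ (((ls.drop s).take (t - s)).zip bl).map (fun p => pvInsertStr p.1 p.2 x)
        ++ ls.drop t).length := by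
    simp [pvSpecA_length, List.length_zip]
    omega
  apply List.ext_getElem hlen
  intro i h1 h2
  rw [pvSpecA_getElem]
  have hn : i < ls.length := by simpa [pvSpecA_length] using h1
  by_cases hlo : i < s
  · rw [if_neg (by omega)]
    rw [List.getElem_append_left (by simp; omega)]
    rw [List.getElem_append_left (by simp; omega), List.getElem_take]
  · by_cases hhi : i < t
    · have hit : i < min t ls.length := by omega
      rw [if_pos (by omega)]
      rw [List.getElem_append_left (by
        simp [List.length_zip]
        omega)]
      rw [List.getElem_append_right (by simp; omega)]
      have hzl : i - (ls.take s).length < ((((ls.drop s).take (t - s)).zip bl).map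
          (fun p => pvInsertStr p.1 p.2 x)).length := by
        simp [List.length_zip]; omega
      simp only [List.getElem_map, List.getElem_zip]
      have hts' : (ls.take s).length = s := by simp; omega
      congr 1
      · rw [List.getElem_take, List.getElem_drop]
        congr 1; omega
      · rw [List.getD_eq_getElem _ _ (by omega)]
        congr 1; omega
    · rw [if_neg (by omega)]
      rw [List.getElem_append_right (by simp [List.length_zip]; omega)]
      rw [List.getElem_drop]
      congr 1
      simp [List.length_zip]
      omega

-- ===== VERDICT (by name: the statement is the Claim_ definition above) =====
theorem insert_large_str_spec : Claim_equal_insert_large_str := by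
  intro base addition insert_x insert_y _
  unfold Spec_insert_large_str
  simp only [insert_large_str, insert_large_str_alt]
  set ls := pySplitNL base with hls
  set bl := pySplitNL addition with hbl
  set y := insert_y
  set x := insert_x
  have h0 : ((min 0 ((y + (bl.length : Int)).toNat) - min 0 y.toNat : Nat) : Int) = 0 := by omega
  have hA := pvLoopA bl x y ls 0 []
  simp only [h0, Nat.cast_zero] at hA
  rw [hA]
  have hst : y.toNat ≤ (y + (bl.length : Int)).toNat := by omega
  have hts : (y + (bl.length : Int)).toNat - y.toNat ≤ bl.length := by omega
  rw [List.nil_append, pvSpecA_decomp bl x _ _ hst hts ls]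
  have hstart : (0 : Int) ≤ max 0 y := le_max_left _ _
  have hstop : (0 : Int) ≤ max 0 (y + (bl.length : Int)) := le_max_left _ _
  rw [PySem.List.slice_to ls hstart, PySem.List.slice_toNat ls hstart hstop,
      PySem.List.slice_from ls hstop]
  have e1 : (max 0 y).toNat = y.toNat := by omega
  have e2 : (max 0 (y + (bl.length : Int))).toNat = (y + (bl.length : Int)).toNat := by omega
  rw [e1, e2]
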